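-- pv_equiv track=rewrite | github.com/harislee168/HackerRankPython | Collection/CompanyLogo.py | sortTheString
-- ===== SOURCE A (Python) =====
-- def sortTheString(s):
--     s_list = sorted(s)
--     s_dict = dict()
--     number = 0
--     for alphabet in s_list:
--         if s_dict.get(alphabet) is None:
--             number = 1
--             s_dict.update({alphabet:number})
--         else:
--             number+=1
--             s_dict.update({alphabet:number})
--     return s_dict
-- ===== SOURCE B (Python) =====
-- def sortTheString(s):
--     return {c: s.count(c) for c in sorted(set(s))}
-- ===== Notes on version B (the rewrite author's own statement) =====
-- stated objective: faster
-- what changed: A sorts all n characters and accumulates counts in a Python-level loop with a running counter over runs; B takes the sorted distinct characters and builds the dict by a comprehension using s.count per distinct character, so per-character work runs in C-level scans instead of a Python-level loop over every character.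
import Mathlib
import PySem

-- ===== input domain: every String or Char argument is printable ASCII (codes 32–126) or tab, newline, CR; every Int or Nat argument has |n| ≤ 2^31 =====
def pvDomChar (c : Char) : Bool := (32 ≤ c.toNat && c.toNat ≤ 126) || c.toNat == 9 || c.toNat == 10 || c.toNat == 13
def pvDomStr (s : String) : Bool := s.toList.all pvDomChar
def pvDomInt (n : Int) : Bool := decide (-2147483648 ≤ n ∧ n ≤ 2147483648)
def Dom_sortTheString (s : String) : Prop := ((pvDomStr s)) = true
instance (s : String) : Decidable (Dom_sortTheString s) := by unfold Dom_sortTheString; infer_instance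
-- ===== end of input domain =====

-- B replaces A's sort-everything-then-accumulate-with-a-running-counter loop by a dict
-- comprehension over the sorted distinct characters that rescans the string per character (idiomatic).

-- ===== PORT A =====
-- the loop body of A's 'for alphabet in s_list' (dict keyed by the 1-char strings Python iterates)
def pvStepA (st : PySem.Dict String Int × Int) (alphabet : Char) : PySem.Dict String Int × Int :=
  match st.1.get? (String.ofList [alphabet]) with
  | none => (st.1.insert (String.ofList [alphabet]) 1, 1)
  | some _ => (st.1.insert (String.ofList [alphabet]) (st.2 + 1), st.2 + 1)

-- sorted(s) iterates the 1-char strings of s in lexicographic order = the characters in codepoint order (exact)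
def sortTheString (s : String) : List (String × Int) :=
  let s_list := PySem.List.sorted s.toList (fun c => c) false
  (s_list.foldl pvStepA (PySem.Dict.empty, 0)).1.items

-- ===== PORT B =====
-- set(s) = PySem.Set.ofList s.toList; sorted over it with the identity key (injective on a set, exact);
-- s.count(c) for a 1-character c is exactly the number of occurrences of that character (exact)
def sortTheString_alt (s : String) : List (String × Int) :=
  (PySem.List.sorted (PySem.Set.ofList s.toList) (fun c => c) false).map
    (fun c => (String.ofList [c], (s.toList.count c : Int)))

-- ===== PRECONDITION & SPEC =====
def Spec_sortTheString (s : String) (out : List (String × Int)) : Prop := out = sortTheString_alt s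
instance (s : String) (out : List (String × Int)) : Decidable (Spec_sortTheString s out) := by unfold Spec_sortTheString; infer_instance

-- ===== CLAIM (what is proved, stated in full; the proofs are below) =====
def Claim_equal_sortTheString : Prop := ∀ (s : String), Dom_sortTheString s → Spec_sortTheString s (sortTheString s)

-- ===== LEMMAS AND PROOFS =====

theorem pvKeyInj {x c : Char} (h : String.ofList [x] = String.ofList [c]) : x = c := by
  have := congrArg String.toList h
  simpa using this

-- inside a run of equal characters A only bumps the stored count in place
theorem pvRunAux (j : Nat) : ∀ (d : PySem.Dict String Int) (c : Char) (i : Int),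
    (List.replicate j c).foldl pvStepA (d.insert (String.ofList [c]) i, i)
      = (d.insert (String.ofList [c]) (i + j), i + j) := by
  induction j with
  | zero => intro d c i; simp
  | succ j ih =>
    intro d c i
    rw [List.replicate_succ, List.foldl_cons]
    have h1 : pvStepA (d.insert (String.ofList [c]) i, i) c
        = (d.insert (String.ofList [c]) (i + 1), i + 1) := by
      simp [pvStepA, PySem.Dict.get?_insert_self, PySem.Dict.insert_insert_self]
    rw [h1, ih d c (i + 1)]
    have : i + 1 + (j : Int) = i + ((j : Nat) + 1 : Nat) := by push_cast; ring
    rw [this]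

theorem pvNotMemDropWhile (c : Char) : ∀ (l : List Char), l.Pairwise (· ≤ ·) →
    (∀ x ∈ l, c ≤ x) → c ∉ l.dropWhile (fun x => x == c) := by
  intro l
  induction l with
  | nil => simp
  | cons a l ih =>
    intro hpw hle
    by_cases hac : a = c
    · subst hac
      rw [List.dropWhile_cons_of_pos (by simp)]
      exact ih hpw.of_cons (fun x hx => hle x (List.mem_cons_of_mem _ hx))
    · rw [List.dropWhile_cons_of_neg (by simpa using hac)]
      intro hmem
      rcases List.mem_cons.mp hmem with h | h
      · exact hac h.symm
      · have h1 : a ≤ c := (List.pairwise_cons.mp hpw).1 c h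
        have h2 : c ≤ a := hle a (List.mem_cons_self)
        exact hac (le_antisymm h1 h2)

theorem pvOfListSublist {α : Type} [BEq α] [LawfulBEq α] :
    ∀ (l : List α), List.Sublist (PySem.Set.ofList l) l := by
  intro l
  induction l with
  | nil => simp [PySem.Set.ofList_nil]
  | cons x xs ih =>
    rw [PySem.Set.ofList_cons]
    exact List.Sublist.cons₂ x (List.Sublist.trans List.filter_sublist ih)

theorem pvOfListRepAppend (c : Char) (j : Nat) : ∀ (rest : List Char), c ∉ rest →
    PySem.Set.ofList (List.replicate (j + 1) c ++ rest) = c :: PySem.Set.ofList rest := by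
  induction j with
  | zero =>
    intro rest hc
    rw [show List.replicate 1 c ++ rest = c :: rest by simp, PySem.Set.ofList_cons]
    congr 1
    simp only [PySem.Set.discard]
    apply List.filter_eq_self.mpr
    intro a ha
    have : a ∈ rest := (PySem.Set.mem_ofList _ _).mp ha
    simp only [ne_eq, Bool.not_eq_eq_eq_not, Bool.not_true, beq_eq_false_iff_ne]
    intro h; exact hc (h ▸ this)
  | succ j ih =>
    intro rest hc
    rw [List.replicate_succ, List.cons_append, PySem.Set.ofList_cons, ih rest hc]
    congr 1
    simp [PySem.Set.discard]
    intro a ha h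
    exact hc (h ▸ ha)

-- main invariant of A's loop on a sorted list with fresh keys
theorem pvMain : ∀ (N : Nat) (ts : List Char) (d : PySem.Dict String Int) (n : Int),
    ts.length ≤ N → ts.Pairwise (· ≤ ·) →
    (∀ x ∈ ts, d.get? (String.ofList [x]) = none) →
    (ts.foldl pvStepA (d, n)).1.items
      = d.items ++ (PySem.Set.ofList ts).map (fun c => (String.ofList [c], (ts.count c : Int))) := by
  intro N
  induction N with
  | zero =>
    intro ts d n hlen _ _
    have hnil : ts = [] := List.length_eq_zero_iff.mp (Nat.le_zero.mp hlen)
    subst hnil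
    simp [PySem.Set.ofList_nil]
  | succ N ih =>
    intro ts d n hlen hpw hfresh
    match ts with
    | [] => simp [PySem.Set.ofList_nil]
    | c :: ts' =>
      have htw : ts'.takeWhile (fun x => x == c)
          = List.replicate (ts'.takeWhile (fun x => x == c)).length c := by
        apply List.eq_replicate_iff.mpr
        refine ⟨rfl, fun b hb => ?_⟩
        simpa using List.mem_takeWhile_imp hb
      set j := (ts'.takeWhile (fun x => x == c)).length with hj
      set rest := ts'.dropWhile (fun x => x == c) with hrest
      have hsplit : ts' = List.replicate j c ++ rest := by
        rw [← htw]; exact (List.takeWhile_append_dropWhile).symm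
      have full : c :: ts' = List.replicate (j + 1) c ++ rest := by
        rw [List.replicate_succ, List.cons_append, ← hsplit]
      have hpw' : ts'.Pairwise (· ≤ ·) := hpw.of_cons
      have hle : ∀ x ∈ ts', c ≤ x := (List.pairwise_cons.mp hpw).1
      have hcrest : c ∉ rest := pvNotMemDropWhile c ts' hpw' hle
      have hrest_sub : List.Sublist rest ts' := List.dropWhile_sublist _
      have hpwrest : rest.Pairwise (· ≤ ·) := hpw'.sublist hrest_sub
      have hlenrest : rest.length ≤ N := by
        have h1 : ts'.length = j + rest.length := by
          rw [hsplit, List.length_append, List.length_replicate]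
        have h2 : ts'.length + 1 ≤ N + 1 := by simpa using hlen
        omega
      have hkey : d.get? (String.ofList [c]) = none := hfresh c List.mem_cons_self
      have hcont : d.contains (String.ofList [c]) = false :=
        (PySem.Dict.get?_eq_none_iff_contains _ _).mp hkey
      rw [full, List.foldl_append]
      have hrun : (List.replicate (j + 1) c).foldl pvStepA (d, n)
          = (d.insert (String.ofList [c]) (1 + (j : Int)), 1 + (j : Int)) := by
        rw [List.replicate_succ, List.foldl_cons]
        have h0 : pvStepA (d, n) c = (d.insert (String.ofList [c]) 1, 1) := by
          simp [pvStepA, hkey]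
        rw [h0, pvRunAux j d c 1]
      rw [hrun]
      have hfresh' : ∀ x ∈ rest,
          (d.insert (String.ofList [c]) (1 + j)).get? (String.ofList [x]) = none := by
        intro x hx
        have hxts : x ∈ ts' := hrest_sub.subset hx
        have hxc : x ≠ c := fun h => hcrest (h ▸ hx)
        rw [PySem.Dict.get?_insert_of_ne _ _ (fun h => hxc (pvKeyInj h))]
        exact hfresh x (List.mem_cons_of_mem _ hxts)
      rw [ih rest _ _ hlenrest hpwrest hfresh']
      rw [PySem.Dict.items_insert_of_not_contains _ _ hcont]
      rw [pvOfListRepAppend c j rest hcrest, List.map_cons, List.append_assoc]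
      congr 1
      have hcount_c : (List.replicate (j + 1) c ++ rest).count c = j + 1 := by
        rw [List.count_append, List.count_replicate]
        simp [List.count_eq_zero_of_not_mem hcrest]
      rw [hcount_c]
      have hmap : ∀ x ∈ PySem.Set.ofList rest,
          (fun c' => (String.ofList [c'], ((List.replicate (j + 1) c ++ rest).count c' : Int))) x
            = (fun c' => (String.ofList [c'], (rest.count c' : Int))) x := by
        intro x hx
        have hxr : x ∈ rest := (PySem.Set.mem_ofList _ _).mp hx
        have hxc : x ≠ c := fun h => hcrest (h ▸ hxr)
        simp [List.count_append, List.count_replicate, Ne.symm hxc]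
      rw [List.map_congr_left hmap]
      simp
      ring

theorem pvSortedSet (s : String) :
    PySem.List.sorted (PySem.Set.ofList s.toList) (fun c => c) false
      = PySem.Set.ofList (PySem.List.sorted s.toList (fun c => c) false) := by
  apply PySem.List.sorted_eq_of_perm_of_pairwise_lt
  · apply (List.perm_ext_iff_of_nodup (PySem.Set.nodup_ofList _) (PySem.Set.nodup_ofList _)).mpr
    intro x
    rw [PySem.Set.mem_ofList, PySem.Set.mem_ofList, PySem.List.mem_sorted]
  · have hsub := pvOfListSublist (PySem.List.sorted s.toList (fun c => c) false)
    have hpw : (PySem.Set.ofList (PySem.List.sorted s.toList (fun c => c) false)).Pairwise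
        (fun a b => a ≤ b) :=
      (PySem.List.sorted_pairwise s.toList (fun c => c)).sublist hsub
    have hnd := PySem.Set.nodup_ofList (PySem.List.sorted s.toList (fun c => c) false)
    exact (hpw.and hnd).imp (fun h => lt_of_le_of_ne h.1 h.2)

theorem sortTheString_spec : Claim_equal_sortTheString := by
  intro s _
  show sortTheString s = sortTheString_alt s
  simp only [sortTheString, sortTheString_alt]
  rw [pvMain (PySem.List.sorted s.toList (fun c => c) false).length _ _ _ le_rfl
      (PySem.List.sorted_pairwise s.toList (fun c => c)) (fun x _ => by simp)]
  rw [pvSortedSet]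
  have hperm := PySem.List.sorted_perm s.toList (fun c => c) false
  have hmap : ∀ x ∈ PySem.Set.ofList (PySem.List.sorted s.toList (fun c => c) false),
      (fun c => (String.ofList [c], ((PySem.List.sorted s.toList (fun c => c) false).count c : Int))) x
        = (fun c => (String.ofList [c], (s.toList.count c : Int))) x := by
    intro x _
    simp [hperm.count_eq]
  rw [List.map_congr_left hmap]
  simp [PySem.Dict.empty]
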